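-- pv_equiv track=rewrite | github.com/mattrid93/CodeJam2021 | reverse_sort_engineering.py | split_score
-- ===== SOURCE A (Python) =====
-- def split_score(C, N):
--     operations = [1]*(N-1)
--     excess = C - (N - 1)
--     for i in range(N-1):
--         allocated = min(N-i-1, excess)
--         operations[i] += allocated
--         excess -= allocated
--     return operations
-- ===== SOURCE B (Python) =====
-- def split_score(C, N):
--     n = N - 1
--     if n < 1:
--         return []
--     excess = C - n
--     if excess <= 0:
--         # all of the (non-positive) excess lands on position 0
--         return [1 + excess] + [1] * (n - 1)
--     T = n * (n + 1) // 2          # total capacity of all positions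
--     D = T - excess
--     if D <= 0:
--         # every position filled to capacity
--         return [N - i for i in range(n)]
--     # binary search the smallest m with m*(m+1)//2 >= D
--     lo, hi = 0, n
--     while hi - lo > 1:
--         mid = (lo + hi) // 2
--         if mid * (mid + 1) // 2 >= D:
--             hi = mid
--         else:
--             lo = mid
--     m = hi                         # m trailing positions are not fully filled
--     left = excess - (T - m * (m + 1) // 2)
--     return [N - i for i in range(n - m)] + [1 + left] + [1] * (m - 1)
-- ===== Notes on version B (the rewrite author's own statement) =====
-- stated objective: faster
-- what changed: A allocates the excess position by position with a Python-level loop of running subtractions; B computes the boundary between fully-filled and untouched positions in closed form from the triangular capacity sum (binary search for the smallest m with m(m+1)/2 >= remaining deficit) and assembles the result from a range comprehension, one leftover cell and a replicated tail.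
import Mathlib
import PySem

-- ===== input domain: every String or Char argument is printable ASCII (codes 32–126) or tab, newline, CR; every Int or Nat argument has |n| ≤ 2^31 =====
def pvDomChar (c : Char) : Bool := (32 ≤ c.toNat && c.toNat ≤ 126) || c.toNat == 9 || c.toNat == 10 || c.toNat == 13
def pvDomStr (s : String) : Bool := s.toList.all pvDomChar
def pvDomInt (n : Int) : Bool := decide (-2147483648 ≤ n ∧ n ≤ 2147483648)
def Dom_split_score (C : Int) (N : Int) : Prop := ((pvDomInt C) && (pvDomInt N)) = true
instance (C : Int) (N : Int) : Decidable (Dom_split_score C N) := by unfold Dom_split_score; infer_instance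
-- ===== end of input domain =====

-- B replaces A's position-by-position O(N) allocation loop by a closed-form triangular-capacity
-- split: a binary search finds the boundary between fully-filled and untouched positions.

-- ===== PORT A =====
-- the for-loop over range(N-1): state (operations, excess), counter i; operations[i] += allocated
-- (index i is always in range, so the in-place update is List.set / getD at i.toNat, 0 ≤ i)
def splitGo (N : Int) (ops : List Int) (excess : Int) (i : Int) : List Int :=
  if i < N - 1 then
    let allocated := min (N - i - 1) excess
    splitGo N (ops.set i.toNat (ops.getD i.toNat 0 + allocated)) (excess - allocated) (i + 1)
  else ops
termination_by (N - 1 - i).toNat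
decreasing_by omega

def split_score (C : Int) (N : Int) : List Int :=
  splitGo N (List.replicate (N - 1).toNat 1) (C - (N - 1)) 0

-- ===== PORT B =====
-- the while-loop of Source B: binary search for the smallest m with m*(m+1)//2 >= D
def bsearchM (D : Int) (lo : Int) (hi : Int) : Int :=
  if _h : 1 < hi - lo then
    let mid := PySem.Int.floordiv (lo + hi) 2
    if D ≤ PySem.Int.floordiv (mid * (mid + 1)) 2 then bsearchM D lo mid
    else bsearchM D mid hi
  else hi
termination_by (hi - lo).toNat
decreasing_by
  all_goals
    have h1 : lo + 1 ≤ PySem.Int.floordiv (lo + hi) 2 :=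
      (PySem.Int.le_floordiv_iff_mul_le (by omega)).mpr (by omega)
    have h2 : PySem.Int.floordiv (lo + hi) 2 < hi :=
      (PySem.Int.floordiv_lt_iff_lt_mul (by omega)).mpr (by omega)
    simp only [mid] at *
    omega

-- n is Source B's local n = N - 1, written out; excess = C - n
def split_score_alt (C : Int) (N : Int) : List Int :=
  if N - 1 < 1 then []
  else if C - (N - 1) ≤ 0 then
    (1 + (C - (N - 1))) :: List.replicate ((N - 1) - 1).toNat 1
  else
    let T := PySem.Int.floordiv ((N - 1) * ((N - 1) + 1)) 2
    let D := T - (C - (N - 1))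
    if D ≤ 0 then (PySem.List.pyRange 0 (N - 1) 1).map (fun i => N - i)
    else
      let m := bsearchM D 0 (N - 1)
      let left := (C - (N - 1)) - (T - PySem.Int.floordiv (m * (m + 1)) 2)
      (PySem.List.pyRange 0 ((N - 1) - m) 1).map (fun i => N - i)
        ++ (1 + left) :: List.replicate (m - 1).toNat 1

-- ===== PRECONDITION & SPEC =====
def Spec_split_score (C : Int) (N : Int) (out : List Int) : Prop := out = split_score_alt C N
instance (C : Int) (N : Int) (out : List Int) : Decidable (Spec_split_score C N out) := by unfold Spec_split_score; infer_instance

-- ===== CLAIM (what is proved, stated in full; the proofs are below) =====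
def Claim_equal_split_score : Prop := ∀ (C : Int) (N : Int), Dom_split_score C N → Spec_split_score C N (split_score C N)

-- ===== LEMMAS AND PROOFS =====

-- common functional description: the list A's loop builds, position capacities n, n-1, …, 1
def aRec : Nat → Int → List Int
  | 0, _ => []
  | n + 1, E => (1 + min ((n : Int) + 1) E) :: aRec n (E - min ((n : Int) + 1) E)

theorem two_floordiv_tri (m : Int) : 2 * PySem.Int.floordiv (m * (m + 1)) 2 = m * (m + 1) := by
  rw [PySem.Int.floordiv_eq_ediv_of_pos (by omega)]
  exact Int.mul_ediv_cancel' (even_iff_two_dvd.mp (Int.even_mul_succ_self m))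

theorem bsearchM_spec : ∀ (k : Nat) (D lo hi : Int), (hi - lo).toNat = k → 0 ≤ lo → lo < hi →
    lo * (lo + 1) < 2 * D → 2 * D ≤ hi * (hi + 1) →
    lo < bsearchM D lo hi ∧ bsearchM D lo hi ≤ hi ∧
      2 * D ≤ bsearchM D lo hi * (bsearchM D lo hi + 1) ∧
      (bsearchM D lo hi - 1) * bsearchM D lo hi < 2 * D := by
  intro k
  induction k using Nat.strong_induction_on with
  | _ k IH =>
    intro D lo hi hk h0 hlt hlo hhi
    rw [bsearchM]
    by_cases hgap : 1 < hi - lo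
    · rw [dif_pos hgap]
      have hmid1 : lo + 1 ≤ PySem.Int.floordiv (lo + hi) 2 :=
        (PySem.Int.le_floordiv_iff_mul_le (by omega)).mpr (by omega)
      have hmid2 : PySem.Int.floordiv (lo + hi) 2 < hi :=
        (PySem.Int.floordiv_lt_iff_lt_mul (by omega)).mpr (by omega)
      set mid := PySem.Int.floordiv (lo + hi) 2 with hmiddef
      have htri := two_floordiv_tri mid
      by_cases hbr : D ≤ PySem.Int.floordiv (mid * (mid + 1)) 2
      · rw [if_pos hbr]
        have : 2 * D ≤ mid * (mid + 1) := by omega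
        exact (IH (mid - lo).toNat (by omega) D lo mid rfl h0 (by omega) hlo this).imp
          (by omega) (fun h => h.imp (by omega) id)
      · rw [if_neg hbr]
        have : mid * (mid + 1) < 2 * D := by omega
        exact (IH (hi - mid).toNat (by omega) D mid hi rfl (by omega) (by omega) this hhi).imp
          (by omega) (fun h => h.imp (by omega) id)
    · rw [dif_neg hgap]
      have : hi = lo + 1 := by omega
      subst this
      refine ⟨by omega, by omega, hhi, by simpa using hlo⟩

theorem tri_unique {D a b : Int} (ha0 : 1 ≤ a) (hb0 : 1 ≤ b)
    (ha1 : 2 * D ≤ a * (a + 1)) (ha2 : (a - 1) * a < 2 * D)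
    (hb1 : 2 * D ≤ b * (b + 1)) (hb2 : (b - 1) * b < 2 * D) : a = b := by
  by_contra hne
  rcases lt_or_gt_of_ne hne with h | h
  · nlinarith
  · nlinarith

-- A's loop equals aRec: invariant form, the already-written prefix generalized
theorem splitGo_spec : ∀ (m : Nat) (N : Int) (pre : List Int) (E i : Int),
    0 ≤ i → i = pre.length → N - 1 = (pre.length : Int) + m →
    splitGo N (pre ++ List.replicate m 1) E i = pre ++ aRec m E := by
  intro m
  induction m with
  | zero =>
    intro N pre E i h0 hi hN
    rw [splitGo, if_neg (by omega)]
    simp [aRec]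
  | succ m IH =>
    intro N pre E i h0 hi hN
    rw [splitGo, if_pos (by omega)]
    have hiN : i.toNat = pre.length := by omega
    have hget : (pre ++ List.replicate (m + 1) 1).getD i.toNat 0 = 1 := by
      rw [hiN]
      simp [List.replicate_succ]
    have hset : (pre ++ List.replicate (m + 1) 1).set i.toNat
        (1 + min (N - i - 1) E) = (pre ++ [1 + min (N - i - 1) E]) ++ List.replicate m 1 := by
      rw [hiN, List.replicate_succ, List.set_append_right _ _ (le_refl _)]
      simp
    have hcap : N - i - 1 = (m : Int) + 1 := by omega
    show splitGo N ((pre ++ List.replicate (m + 1) 1).set i.toNat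
        ((pre ++ List.replicate (m + 1) 1).getD i.toNat 0 + min (N - i - 1) E))
        (E - min (N - i - 1) E) (i + 1) = pre ++ aRec (m + 1) E
    rw [hget, hset]
    rw [IH N (pre ++ [1 + min (N - i - 1) E]) (E - min (N - i - 1) E) (i + 1)
      (by omega) (by simp; omega) (by simp; push_cast; omega)]
    simp only [hcap, aRec, List.append_assoc, List.cons_append, List.nil_append]

theorem A_eq_aRec (C N : Int) : split_score C N = aRec (N - 1).toNat (C - (N - 1)) := by
  rw [split_score]
  by_cases hN : 1 ≤ N
  · have := splitGo_spec (N - 1).toNat N [] (C - (N - 1)) 0 (by omega) (by simp) (by simp; omega)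
    simpa using this
  · have h0 : (N - 1).toNat = 0 := by omega
    rw [h0, splitGo, if_neg (by omega)]
    simp [aRec]

theorem aRec_zero (n : Nat) : aRec n 0 = List.replicate n 1 := by
  induction n with
  | zero => rfl
  | succ n IH =>
    rw [aRec, min_eq_right (by positivity)]
    simpa [List.replicate_succ] using IH

theorem aRec_nonpos (n : Nat) (E : Int) (hE : E ≤ 0) :
    aRec (n + 1) E = (1 + E) :: List.replicate n 1 := by
  rw [aRec, min_eq_right (by omega)]
  have h0 : E - E = 0 := by omega
  rw [h0, aRec_zero]

-- descending prefix: peel the head off a [N - i for i in range(b)] comprehension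
theorem map_sub_range_cons (N b : Int) (hb : 0 < b) :
    (PySem.List.pyRange 0 b 1).map (fun i => N - i)
      = N :: (PySem.List.pyRange 0 (b - 1) 1).map (fun i => N - 1 - i) := by
  rw [PySem.List.pyRange_one_cons hb]
  simp only [List.map_cons, sub_zero]
  congr 1
  rw [PySem.List.pyRange_one, PySem.List.pyRange_one]
  have hlen : (b - 1 - 0).toNat = (b - 1).toNat := by omega
  rw [hlen, List.map_map, List.map_map]
  exact List.map_congr_left (fun k _ => by simp; ring)

-- B's body with n = N - 1 written as a Nat (what split_score_alt computes for N = n + 1)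
def altCore (n : Nat) (E : Int) : List Int :=
  if (n : Int) < 1 then []
  else if E ≤ 0 then (1 + E) :: List.replicate ((n : Int) - 1).toNat 1
  else
    let T := PySem.Int.floordiv ((n : Int) * ((n : Int) + 1)) 2
    let D := T - E
    if D ≤ 0 then (PySem.List.pyRange 0 (n : Int) 1).map (fun i => ((n : Int) + 1) - i)
    else
      let m := bsearchM D 0 (n : Int)
      let left := E - (T - PySem.Int.floordiv (m * (m + 1)) 2)
      (PySem.List.pyRange 0 ((n : Int) - m) 1).map (fun i => ((n : Int) + 1) - i)
        ++ (1 + left) :: List.replicate (m - 1).toNat 1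

theorem alt_eq_core (C N : Int) :
    split_score_alt C N = altCore (N - 1).toNat (C - (N - 1)) := by
  by_cases hN : N - 1 < 1
  · have h0 : (N - 1).toNat = 0 := by omega
    simp only [split_score_alt, altCore, h0, if_pos hN]
    norm_num
  · have hc : (((N - 1).toNat : Int)) = N - 1 := by omega
    simp only [split_score_alt, altCore, hc]
    rw [show (N - 1) + 1 = N from by ring]

theorem aRec_eq_core : ∀ (n : Nat) (E : Int), aRec n E = altCore n E := by
  intro n
  induction n with
  | zero => intro E; simp [aRec, altCore]
  | succ m IH =>
    intro E
    by_cases hE : E ≤ 0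
    · rw [aRec_nonpos m E hE]
      simp only [altCore]
      rw [if_neg (by push_cast; omega), if_pos hE]
      congr 2
      omega
    · push_neg at hE
      rw [aRec]
      simp only [altCore]
      rw [if_neg (by push_cast; omega), if_neg (by omega),
        show ((m + 1 : Nat) : Int) = (m : Int) + 1 from by push_cast; ring]
      have hT := two_floordiv_tri ((m : Int) + 1)
      have hT' := two_floordiv_tri ((m : Int))
      have hP : ((m : Int) + 1) * ((m : Int) + 1 + 1)
          = (m : Int) * ((m : Int) + 1) + 2 * ((m : Int) + 1) := by ring
      have hPn : 0 ≤ (m : Int) * ((m : Int) + 1) := mul_nonneg (by positivity) (by positivity)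
      by_cases hD : PySem.Int.floordiv (((m : Int) + 1) * ((m : Int) + 1 + 1)) 2 - E ≤ 0
      · -- excess at least the total capacity: every position filled to the brim
        rw [if_pos hD, min_eq_left (by linarith), map_sub_range_cons _ _ (by positivity),
          show (m : Int) + 1 + 1 - 1 = (m : Int) + 1 from by ring,
          show (m : Int) + 1 - 1 = (m : Int) from by ring]
        congr 1
        · omega
        · rw [IH]
          simp only [altCore]
          by_cases hm0 : m = 0
          · subst hm0
            norm_num [PySem.List.pyRange_one_eq_nil (le_refl (0 : Int))]
          · have hm0' : (1 : Int) ≤ (m : Int) := by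
              have := Nat.one_le_iff_ne_zero.mpr hm0; exact_mod_cast this
            have hPm : 2 ≤ (m : Int) * ((m : Int) + 1) := by nlinarith [hm0']
            rw [if_neg (by push_cast; omega), if_neg (by linarith), if_pos (by linarith)]
      · -- partial fill: the binary search finds the boundary
        push_neg at hD
        rw [if_neg (by omega)]
        have hbs := bsearchM_spec ((m : Int) + 1 - 0).toNat
          (PySem.Int.floordiv (((m : Int) + 1) * ((m : Int) + 1 + 1)) 2 - E) 0 ((m : Int) + 1)
          rfl (le_refl 0) (by positivity) (by linarith) (by linarith)
        set M := bsearchM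
          (PySem.Int.floordiv (((m : Int) + 1) * ((m : Int) + 1 + 1)) 2 - E) 0 ((m : Int) + 1)
          with hMdef
        obtain ⟨hM0, hMhi, hM1, hM2⟩ := hbs
        have htriM := two_floordiv_tri M
        by_cases hEm : E ≤ (m : Int)
        · -- the whole excess fits into position 0
          have hMeq : M = (m : Int) + 1 :=
            tri_unique (by omega) (by omega) hM1 hM2 (by linarith) (by linarith)
          rw [hMeq, show (m : Int) + 1 - ((m : Int) + 1) = 0 from by ring,
            PySem.List.pyRange_one_eq_nil (le_refl (0 : Int))]
          simp only [List.map_nil, List.nil_append]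
          rw [min_eq_right (by omega), show E - E = 0 from sub_self E, aRec_zero, sub_self]
          congr 2
          · omega
          · omega
        · -- position 0 filled to capacity; the tail is the same problem one size down
          push_neg at hEm
          have hMle : M ≤ (m : Int) := by nlinarith [hM2, hM0]
          have hm0' : (1 : Int) ≤ (m : Int) := by omega
          rw [min_eq_left (by omega), IH (E - ((m : Int) + 1))]
          simp only [altCore]
          rw [if_neg (by push_cast; omega)]
          by_cases hE0 : E - ((m : Int) + 1) ≤ 0
          · -- tail excess exactly zero: E = capacity of position 0
            have hMeq : M = (m : Int) :=
              tri_unique (by omega) (by omega) hM1 hM2 (by linarith) (by nlinarith)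
            rw [if_pos hE0, hMeq, show (m : Int) + 1 - (m : Int) = 1 from by ring,
              map_sub_range_cons _ _ (by omega),
              PySem.List.pyRange_one_eq_nil (by omega : (1 : Int) - 1 ≤ 0)]
            simp only [List.map_nil, List.cons_append, List.nil_append]
            rw [show (1 : Int) + ((m : Int) + 1) = (m : Int) + 1 + 1 from by ring,
              show E - ((m : Int) + 1)
                  = E - (PySem.Int.floordiv (((m : Int) + 1) * ((m : Int) + 1 + 1)) 2
                    - PySem.Int.floordiv ((m : Int) * ((m : Int) + 1)) 2) from by
                linarith [hT, hT', hP]]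
          · push_neg at hE0
            rw [if_neg (by omega),
              if_neg (show ¬ (PySem.Int.floordiv ((m : Int) * ((m : Int) + 1)) 2
                - (E - ((m : Int) + 1)) ≤ 0) from by simp only [not_le]; linarith)]
            rw [show PySem.Int.floordiv ((m : Int) * ((m : Int) + 1)) 2 - (E - ((m : Int) + 1))
              = PySem.Int.floordiv (((m : Int) + 1) * ((m : Int) + 1 + 1)) 2 - E from by linarith]
            have hbs2 := bsearchM_spec ((m : Int) - 0).toNat
              (PySem.Int.floordiv (((m : Int) + 1) * ((m : Int) + 1 + 1)) 2 - E) 0 ((m : Int))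
              rfl (le_refl 0) (by omega) (by linarith) (by nlinarith [hM1, hMle, hM0])
            obtain ⟨hN0, hNhi, hN1, hN2⟩ := hbs2
            rw [show bsearchM
                (PySem.Int.floordiv (((m : Int) + 1) * ((m : Int) + 1 + 1)) 2 - E) 0 ((m : Int))
                = M from tri_unique (by omega) (by omega) hN1 hN2 hM1 hM2]
            rw [map_sub_range_cons ((m : Int) + 1 + 1) ((m : Int) + 1 - M) (by omega),
              show (m : Int) + 1 + 1 - 1 = (m : Int) + 1 from by ring,
              show (m : Int) + 1 - M - 1 = (m : Int) - M from by ring,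
              show E - ((m : Int) + 1) - (PySem.Int.floordiv ((m : Int) * ((m : Int) + 1)) 2
                  - PySem.Int.floordiv (M * (M + 1)) 2)
                = E - (PySem.Int.floordiv (((m : Int) + 1) * ((m : Int) + 1 + 1)) 2
                  - PySem.Int.floordiv (M * (M + 1)) 2) from by linarith]
            simp only [List.cons_append]
            rw [show (1 : Int) + ((m : Int) + 1) = (m : Int) + 1 + 1 from by ring]

theorem B_eq_aRec (C N : Int) : split_score_alt C N = aRec (N - 1).toNat (C - (N - 1)) := by
  rw [alt_eq_core, aRec_eq_core]

-- ===== VERDICT (by name: the statement is the Claim_ definition above) =====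
theorem split_score_spec : Claim_equal_split_score := by
  intro C N _
  unfold Spec_split_score
  rw [A_eq_aRec, B_eq_aRec]
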